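-- pv_equiv track=rewrite | github.com/bunny0111/python_code | Daily Questions/26 MakeSumEven.py | min_removals
-- ===== SOURCE A (Python) =====
-- def min_removals(numbers):
--     total_sum = sum(numbers)
--
--     # If the total sum is already even, no elements need to be removed
--     if total_sum % 2 == 0:
--         return 0
--
--     # If the total sum is odd, find an odd element to remove
--     for element in numbers:
--         if element % 2 != 0:
--             return 1
--
--     # If all elements are even, remove any one to make the sum even
--     return 1
-- ===== SOURCE B (Python) =====
-- def min_removals(numbers):
--     # The sum's parity equals the parity of the count of odd elements,
--     # so never compute the sum: count odd elements and return that count mod 2.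
--     odd_count = 0
--     for x in numbers:
--         if x % 2 != 0:
--             odd_count += 1
--     return odd_count % 2
-- ===== Notes on version B (the rewrite author's own statement) =====
-- stated objective: alternative
-- what changed: Instead of summing and then scanning for an odd element, B never computes the sum: it counts the odd elements in one pass and returns the parity of that count, which equals the sum's parity.
import Mathlib
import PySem

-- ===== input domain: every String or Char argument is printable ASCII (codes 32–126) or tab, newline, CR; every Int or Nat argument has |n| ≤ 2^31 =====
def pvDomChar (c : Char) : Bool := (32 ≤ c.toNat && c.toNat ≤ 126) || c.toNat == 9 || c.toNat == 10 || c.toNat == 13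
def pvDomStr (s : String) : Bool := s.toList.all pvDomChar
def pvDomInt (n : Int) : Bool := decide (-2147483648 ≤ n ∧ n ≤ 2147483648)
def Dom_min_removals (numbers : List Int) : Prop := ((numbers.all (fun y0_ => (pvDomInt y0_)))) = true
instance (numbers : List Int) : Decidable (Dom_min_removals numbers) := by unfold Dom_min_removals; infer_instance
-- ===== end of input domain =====

-- ===== PORT A =====
-- B never computes the sum: it counts the odd elements and returns that count's parity (objective: alternative, same cost).
-- A's scan for an odd element; returns 1 on finding one, and 1 after the loop too
def min_removals_scan (numbers : List Int) : Int :=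
  match numbers with
  | [] => 1
  | element :: rest =>
    if PySem.Int.mod element 2 != 0 then 1 else min_removals_scan rest

def min_removals (numbers : List Int) : Int :=
  let total_sum := numbers.foldl (· + ·) 0
  if PySem.Int.mod total_sum 2 == 0 then 0
  else min_removals_scan numbers

-- ===== PORT B =====
def min_removals_alt (numbers : List Int) : Int :=
  let odd_count := numbers.foldl
    (fun acc x => if PySem.Int.mod x 2 != 0 then acc + 1 else acc) (0 : Int)
  PySem.Int.mod odd_count 2

-- ===== PRECONDITION & SPEC =====
def Spec_min_removals (numbers : List Int) (out : Int) : Prop := out = min_removals_alt numbers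
instance (numbers : List Int) (out : Int) : Decidable (Spec_min_removals numbers out) := by unfold Spec_min_removals; infer_instance

-- ===== CLAIM =====
def Claim_equal_min_removals : Prop := ∀ (numbers : List Int), Dom_min_removals numbers → Spec_min_removals numbers (min_removals numbers)

-- ===== LEMMAS AND PROOFS =====
lemma scan_eq_one (numbers : List Int) : min_removals_scan numbers = 1 := by
  induction numbers with
  | nil => rfl
  | cons a r ih => simp [min_removals_scan, ih]

-- parity invariant: the running sum and the running odd-count agree mod 2
lemma parity_fold (numbers : List Int) : ∀ (s c : Int), s % 2 = c % 2 →
    (numbers.foldl (· + ·) s) % 2 =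
    (numbers.foldl (fun acc x => if x % 2 != 0 then acc + 1 else acc) c) % 2 := by
  induction numbers with
  | nil => intro s c h; simpa using h
  | cons x r ih =>
    intro s c h
    by_cases hx : x % 2 = 0
    · simp only [List.foldl, hx]
      simp only [bne_self_eq_false, Bool.false_eq_true, if_false]
      exact ih _ _ (by omega)
    · simp only [List.foldl]
      rw [if_pos (by simpa using hx)]
      exact ih _ _ (by omega)

-- ===== VERDICT =====
theorem min_removals_spec : Claim_equal_min_removals := by
  intro numbers _
  unfold Spec_min_removals min_removals min_removals_alt
  have hm : ∀ a : Int, PySem.Int.mod a 2 = a % 2 := fun a =>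
    PySem.Int.mod_eq_emod_of_pos (by omega)
  simp only [hm]
  have h := parity_fold numbers 0 0 rfl
  by_cases hs : (numbers.foldl (· + ·) 0) % 2 = 0
  · rw [if_pos (by simpa using hs), ← h]
    exact hs.symm
  · rw [if_neg (by simpa using hs), scan_eq_one]
    omega
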